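-- pv_equiv track=rewrite | github.com/lukhi-laksh/learn-python | Chapter-19/DSA Concepts/Pre-Suffix/SumSubArr-I.py | SumSubArr
-- ===== SOURCE A (Python) =====
-- def SumSubArr(s):
--     for i in range(0, len(s)-1):
--         left, right = 0, 0
--         for j in range(0, i):
--             left += s[j]
--         for k in range(i, len(s)):
--             right += s[k]
--         if left == right:
--             return True
--     return False
-- ===== SOURCE B (Python) =====
-- def SumSubArr(s):
--     total = sum(s)
--     left = 0
--     for x in s[:-1]:
--         if left == total - left:
--             return True
--         left += x
--     return False
-- ===== Notes on version B (the rewrite author's own statement) =====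
-- stated objective: faster
-- what changed: Replaced the O(n^2) recomputation of both side sums for every split point with a single pass that maintains a running prefix sum and derives the right side as total - left.
import Mathlib
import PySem

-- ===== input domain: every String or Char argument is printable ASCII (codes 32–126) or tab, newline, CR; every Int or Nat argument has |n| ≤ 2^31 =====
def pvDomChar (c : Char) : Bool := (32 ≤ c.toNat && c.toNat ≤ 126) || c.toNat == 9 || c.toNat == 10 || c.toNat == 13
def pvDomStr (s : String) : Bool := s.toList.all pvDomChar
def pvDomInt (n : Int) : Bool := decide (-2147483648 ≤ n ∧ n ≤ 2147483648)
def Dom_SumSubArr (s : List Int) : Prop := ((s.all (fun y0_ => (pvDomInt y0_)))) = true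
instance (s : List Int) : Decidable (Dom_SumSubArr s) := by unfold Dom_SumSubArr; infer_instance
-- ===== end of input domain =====

-- B replaces A's quadratic recomputation of both side sums with one pass over a running
-- prefix sum (right = total - left); objective: faster (asymptotic, O(n^2) -> O(n)).


-- ===== PORT A =====
-- outer 'for i in range(0, len(s)-1)' with early return; inner loops are foldl over pyRange,
-- s[j] via pyGetD (always in range here)
def SumSubArrLoopA (s : List Int) : List Int → Bool
  | [] => false
  | i :: rest =>
    let left := (PySem.List.pyRange 0 i 1).foldl (fun a j => a + PySem.List.pyGetD s j 0) 0
    let right := (PySem.List.pyRange i (s.length : Int) 1).foldl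
      (fun a k => a + PySem.List.pyGetD s k 0) 0
    if left == right then true else SumSubArrLoopA s rest

def SumSubArr (s : List Int) : Bool :=
  SumSubArrLoopA s (PySem.List.pyRange 0 ((s.length : Int) - 1) 1)

-- ===== PORT B =====
-- 'for x in s[:-1]' with running left and early return (right = total - left)
def SumSubArrLoopB (total : Int) : Int → List Int → Bool
  | _, [] => false
  | left, x :: rest =>
    if left == total - left then true else SumSubArrLoopB total (left + x) rest

def SumSubArr_alt (s : List Int) : Bool :=
  SumSubArrLoopB s.sum 0 (PySem.List.slice s none (some (-1)))

-- ===== PRECONDITION & SPEC =====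
def Spec_SumSubArr (s : List Int) (out : Bool) : Prop := out = SumSubArr_alt s
instance (s : List Int) (out : Bool) : Decidable (Spec_SumSubArr s out) := by unfold Spec_SumSubArr; infer_instance

-- ===== CLAIM (what is proved, stated in full; the proofs are below) =====
def Claim_equal_SumSubArr : Prop := ∀ (s : List Int), Dom_SumSubArr s → Spec_SumSubArr s (SumSubArr s)

-- ===== LEMMAS AND PROOFS =====

-- one-step unfoldings of the two loops (definitional)
lemma sumsubarr_loopA_cons (s : List Int) (i : Int) (rest : List Int) :
    SumSubArrLoopA s (i :: rest) =
      (if (PySem.List.pyRange 0 i 1).foldl (fun a j => a + PySem.List.pyGetD s j 0) 0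
            == (PySem.List.pyRange i (s.length : Int) 1).foldl
                 (fun a k => a + PySem.List.pyGetD s k 0) 0
        then true else SumSubArrLoopA s rest) := rfl

lemma sumsubarr_loopB_cons (total left x : Int) (rest : List Int) :
    SumSubArrLoopB total left (x :: rest) =
      (if left == total - left then true else SumSubArrLoopB total (left + x) rest) := rfl

-- A's inner left-loop computes the prefix sum
lemma sumsubarr_left_loop (s : List Int) (i : Nat) (hi : i ≤ s.length) :
    (PySem.List.pyRange 0 (i : Int) 1).foldl (fun a j => a + PySem.List.pyGetD s j 0) 0
      = (s.take i).sum := by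
  induction i with
  | zero => simp [PySem.List.pyRange_one_eq_nil]
  | succ n ih =>
    have hn : n < s.length := by omega
    rw [show ((n + 1 : Nat) : Int) = (n : Int) + 1 by push_cast; ring,
      PySem.List.pyRange_one_succ_right (by omega : (0:Int) ≤ (n:Int)),
      List.foldl_append, ih (by omega)]
    simp only [List.foldl_cons, List.foldl_nil, PySem.List.pyGetD_natCast]
    rw [List.getD_eq_getElem?_getD, List.getElem?_eq_getElem hn, List.sum_take_succ s n hn]
    rfl

-- A's inner right-loop computes the suffix sum
lemma sumsubarr_right_loop (s : List Int) (i : Nat) :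
    (PySem.List.pyRange (i : Int) (s.length : Int) 1).foldl
        (fun a k => a + PySem.List.pyGetD s k 0) 0 = (s.drop i).sum := by
  rw [PySem.List.foldl_pyRange_pyGetD' s 0 (fun a x => a + x) 0 (by omega : (0:Int) ≤ (i:Int))]
  simp [List.sum_eq_foldl]

-- the two loops agree, relating index i to the residual list s.dropLast.drop i
lemma sumsubarr_loops (s : List Int) : ∀ (k i : Nat), k = s.length - 1 - i →
    SumSubArrLoopA s (PySem.List.pyRange (i : Int) ((s.length : Int) - 1) 1)
      = SumSubArrLoopB s.sum (s.take i).sum (s.dropLast.drop i) := by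
  intro k
  induction k with
  | zero =>
    intro i hk
    have hend : (s.length : Int) - 1 ≤ (i : Int) := by omega
    rw [PySem.List.pyRange_one_eq_nil hend]
    have : s.dropLast.drop i = [] := by
      apply List.drop_eq_nil_of_le
      simp; omega
    rw [this]
    rfl
  | succ n ih =>
    intro i hk
    have hlt : (i : Int) < (s.length : Int) - 1 := by omega
    have hilen : i < s.length - 1 := by omega
    rw [PySem.List.pyRange_one_cons hlt]
    have hdl : i < s.dropLast.length := by simp; omega
    have hcons : s.dropLast.drop i = s.dropLast[i] :: s.dropLast.drop (i + 1) :=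
      List.drop_eq_getElem_cons hdl
    have hget : s.dropLast[i] = s[i]'(by omega) := List.getElem_dropLast _
    rw [hcons, hget, sumsubarr_loopA_cons, sumsubarr_loopB_cons,
      sumsubarr_left_loop s i (by omega), sumsubarr_right_loop s i]
    have htot : s.sum = (s.take i).sum + (s.drop i).sum := by
      conv_lhs => rw [← List.take_append_drop i s]
      rw [List.sum_append]
    have hcond : ((s.take i).sum == (s.drop i).sum)
        = ((s.take i).sum == s.sum - (s.take i).sum) := by
      rw [show ((s.take i).sum == (s.drop i).sum)
            = decide ((s.take i).sum = (s.drop i).sum) from rfl,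
        show ((s.take i).sum == s.sum - (s.take i).sum)
            = decide ((s.take i).sum = s.sum - (s.take i).sum) from rfl]
      have hiff : ((s.take i).sum = (s.drop i).sum)
          ↔ ((s.take i).sum = s.sum - (s.take i).sum) := by omega
      simp [hiff]
    rw [hcond]
    by_cases hc : ((s.take i).sum == s.sum - (s.take i).sum) = true
    · rw [if_pos hc, if_pos hc]
    · rw [if_neg hc, if_neg hc, ← List.sum_take_succ s i (by omega),
        show ((i : Int) + 1) = ((i + 1 : Nat) : Int) by push_cast; ring]
      exact ih (i + 1) (by omega)

-- ===== VERDICT (by name: the statement is the Claim_ definition above) =====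
theorem SumSubArr_spec : Claim_equal_SumSubArr := by
  intro s _
  unfold Spec_SumSubArr SumSubArr SumSubArr_alt
  rw [PySem.List.slice_to_neg_one]
  have h := sumsubarr_loops s (s.length - 1 - 0) 0 rfl
  simpa using h
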